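-- pv_equiv track=rewrite | github.com/Inbar-Gil/Okyanus | Output/Domain.py | edit_result_to_dict
-- ===== SOURCE A (Python) =====
-- def is_not_empty(string):
--     return string != "" and string != " "
--
-- def edit_result_to_dict(result):
--     dictionary = {}
--     lines = list(filter(is_not_empty, result.split("\n")))
--     for line in lines:
--         filtered_line = list(filter(is_not_empty, line.split(" ")))
--
--         if filtered_line[0] in dictionary:
--             dictionary[filtered_line[0]] += ", " + " ".join(filtered_line[1:])
--         else:
--             dictionary[filtered_line[0]] = " ".join(filtered_line[1:])
--
--     return dictionary
-- ===== SOURCE B (Python) =====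
-- def is_not_empty(string):
--     return string != "" and string != " "
--
-- def edit_result_to_dict(result):
--     token_lines = [[t for t in line.split(" ") if is_not_empty(t)]
--                    for line in result.split("\n") if is_not_empty(line)]
--     keys = []
--     for toks in token_lines:
--         if toks[0] not in keys:
--             keys.append(toks[0])
--     return {key: ", ".join(" ".join(toks[1:])
--                            for toks in token_lines if toks[0] == key)
--             for key in keys}
-- ===== Notes on version B (the rewrite author's own statement) =====
-- stated objective: alternative
-- what changed: B replaces A's single-pass dict accumulation (in-loop string concatenation guarded by a membership branch) with a staged group-by: tokenize all lines, collect the distinct first tokens in first-seen order, then for each key scan the tokenized lines and join the matching remainders once; no dict is built during the loop.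
import Mathlib
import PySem

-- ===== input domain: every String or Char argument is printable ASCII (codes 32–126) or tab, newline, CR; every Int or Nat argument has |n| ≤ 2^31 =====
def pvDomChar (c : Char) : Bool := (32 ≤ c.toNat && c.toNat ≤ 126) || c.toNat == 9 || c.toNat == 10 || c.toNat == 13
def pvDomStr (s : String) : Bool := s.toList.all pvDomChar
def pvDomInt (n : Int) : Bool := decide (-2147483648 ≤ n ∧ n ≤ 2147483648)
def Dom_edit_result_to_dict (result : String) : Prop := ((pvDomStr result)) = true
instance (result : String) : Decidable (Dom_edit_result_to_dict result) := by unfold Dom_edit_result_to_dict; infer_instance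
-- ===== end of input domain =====

-- B replaces A's single-pass dict accumulation by a staged group-by (tokenize all, dedup keys, per-key scan and join); same return value on Pre_.

-- ===== PORT A =====
def is_not_empty (s : String) : Bool := s ≠ "" && s ≠ " "

def edit_result_to_dict (result : String) : List (String × String) :=
  -- split? is some since the separator "\n" is nonempty
  let lines := ((PySem.Str.split? result "\n").getD []).filter is_not_empty
  let d := lines.foldl (fun dictionary line =>
    let filtered_line := ((PySem.Str.split? line " ").getD []).filter is_not_empty
    match filtered_line with
    | [] => dictionary  -- Python raises IndexError here (filtered_line[0]); excluded by Pre_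
    | k :: rest =>
      if dictionary.contains k then
        dictionary.insert k (dictionary.getD k "" ++ (", " ++ PySem.Str.join " " rest))
      else
        dictionary.insert k (PySem.Str.join " " rest)) PySem.Dict.empty
  d.items

-- ===== PORT B =====
def edit_result_to_dict_alt (result : String) : List (String × String) :=
  let token_lines := (((PySem.Str.split? result "\n").getD []).filter is_not_empty).map
    (fun line => ((PySem.Str.split? line " ").getD []).filter is_not_empty)
  let keys := token_lines.foldl (fun keys toks =>
    match toks with
    | [] => keys  -- Python raises IndexError here (toks[0]); excluded by Pre_
    | k :: _ => if keys.contains k then keys else keys ++ [k]) ([] : List String)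
  keys.map (fun key => (key, PySem.Str.join ", "
    ((token_lines.filter (fun toks => match toks with
        | [] => false  -- Python raises IndexError here (toks[0]); excluded by Pre_
        | k :: _ => k == key)).map
      (fun toks => PySem.Str.join " " toks.tail))))

-- ===== PRECONDITION & SPEC =====
-- Pre_ excludes inputs with a line made only of two or more spaces: such a line passes the
-- line filter but has no tokens, so BOTH programs raise IndexError on the [0] index.
def Pre_edit_result_to_dict (result : String) : Prop :=
  ∀ line ∈ ((PySem.Str.split? result "\n").getD []).filter is_not_empty,
    ((PySem.Str.split? line " ").getD []).filter is_not_empty ≠ []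
instance (result : String) : Decidable (Pre_edit_result_to_dict result) := by unfold Pre_edit_result_to_dict; infer_instance

def pvWitness_edit_result_to_dict : String := "key a b\nkey c\nother\nkey d"

def Spec_edit_result_to_dict (result : String) (out : List (String × String)) : Prop := out = edit_result_to_dict_alt result
instance (result : String) (out : List (String × String)) : Decidable (Spec_edit_result_to_dict result out) := by unfold Spec_edit_result_to_dict; infer_instance

-- ===== CLAIM (what is proved, stated in full; the proofs are below) =====
def Claim_equal_edit_result_to_dict : Prop := ∀ (result : String), Dom_edit_result_to_dict result → Pre_edit_result_to_dict result → Spec_edit_result_to_dict result (edit_result_to_dict result)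

-- ===== LEMMAS AND PROOFS =====

-- tokenization, key and remainder of a line, named for the proofs
def pvTok (line : String) : List String := ((PySem.Str.split? line " ").getD []).filter is_not_empty
def pvKey (line : String) : String := (pvTok line).headD ""
def pvPiece (line : String) : String := PySem.Str.join " " (pvTok line).tail

-- the two loop bodies of the intermediate piece-dict view of A, named for the proofs
def pvStepA (dictionary : PySem.Dict String String) (line : String) : PySem.Dict String String :=
  match ((PySem.Str.split? line " ").getD []).filter is_not_empty with
  | [] => dictionary
  | k :: rest =>
    if dictionary.contains k then
      dictionary.insert k (dictionary.getD k "" ++ (", " ++ PySem.Str.join " " rest))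
    else
      dictionary.insert k (PySem.Str.join " " rest)

def pvStepB (buckets : PySem.Dict String (List String)) (line : String) : PySem.Dict String (List String) :=
  match ((PySem.Str.split? line " ").getD []).filter is_not_empty with
  | [] => buckets
  | key :: rest => buckets.modify key [] (fun pieces => pieces ++ [PySem.Str.join " " rest])

def pvJoinVal (p : String × List String) : String × String := (p.1, PySem.Str.join ", " p.2)

lemma chars_join_append_singleton (sep : List Char) (a : List Char) (vs : List (List Char)) (v : List Char) :
    PySem.Chars.join sep ((a :: vs) ++ [v]) = PySem.Chars.join sep (a :: vs) ++ sep ++ v := by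
  induction vs generalizing a with
  | nil => simp [PySem.Chars.join_cons_cons, PySem.Chars.join_singleton]
  | cons b vs ih =>
    calc PySem.Chars.join sep ((a :: b :: vs) ++ [v])
        = a ++ sep ++ PySem.Chars.join sep ((b :: vs) ++ [v]) :=
          PySem.Chars.join_cons_cons sep a b (vs ++ [v])
      _ = a ++ sep ++ (PySem.Chars.join sep (b :: vs) ++ sep ++ v) := by rw [ih b]
      _ = (a ++ sep ++ PySem.Chars.join sep (b :: vs)) ++ sep ++ v := by
          simp [List.append_assoc]
      _ = PySem.Chars.join sep (a :: b :: vs) ++ sep ++ v := by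
          rw [PySem.Chars.join_cons_cons]

lemma str_join_append_singleton (vs : List String) (v : String) (h : vs ≠ []) :
    PySem.Str.join ", " (vs ++ [v]) = PySem.Str.join ", " vs ++ (", " ++ v) := by
  obtain ⟨a, vs, rfl⟩ := List.exists_cons_of_ne_nil h
  have : (PySem.Str.join ", " ((a :: vs) ++ [v])).toList
      = (PySem.Str.join ", " (a :: vs) ++ (", " ++ v)).toList := by
    simp only [PySem.Str.join, String.toList_ofList, String.toList_append, List.map_append,
      List.map_cons, List.map_nil]
    have := chars_join_append_singleton (", ".toList) a.toList (vs.map String.toList) v.toList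
    simpa [List.append_assoc] using this
  calc PySem.Str.join ", " ((a :: vs) ++ [v])
      = String.ofList (PySem.Str.join ", " ((a :: vs) ++ [v])).toList := by rw [String.ofList_toList]
    _ = String.ofList (PySem.Str.join ", " (a :: vs) ++ (", " ++ v)).toList := by rw [this]
    _ = PySem.Str.join ", " (a :: vs) ++ (", " ++ v) := by rw [String.ofList_toList]

lemma contains_mapJoin (g : PySem.Dict String (List String)) (k : String) :
    (PySem.Dict.mk (g.items.map pvJoinVal)).contains k = g.contains k := by
  simp [PySem.Dict.contains, List.any_map, pvJoinVal, Function.comp_def]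

lemma pvInv (lines : List String) : ∀ (g : PySem.Dict String (List String)),
    g.keys.Nodup → (∀ p ∈ g.items, p.2 ≠ []) →
    (∀ line ∈ lines, ((PySem.Str.split? line " ").getD []).filter is_not_empty ≠ []) →
    (lines.foldl pvStepA (PySem.Dict.mk (g.items.map pvJoinVal))).items
      = (lines.foldl pvStepB g).items.map pvJoinVal := by
  induction lines with
  | nil => intro g _ _ _; simp
  | cons line lines ih =>
    intro g hnd hne hpre
    simp only [List.foldl_cons]
    have htok := hpre line (by simp)
    obtain ⟨k, rest, htokeq⟩ := List.exists_cons_of_ne_nil htok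
    have hstepA : pvStepA (PySem.Dict.mk (g.items.map pvJoinVal)) line
        = PySem.Dict.mk ((pvStepB g line).items.map pvJoinVal) := by
      apply PySem.Dict.ext
      simp only [pvStepA, pvStepB, htokeq]
      by_cases hc : g.contains k = true
      · -- existing key: A rewrites the string in place, B appends to the list in place
        rw [contains_mapJoin]
        simp only [hc, if_true]
        obtain ⟨vs, hvs⟩ : ∃ vs, g.get? k = some vs := by
          have := PySem.Dict.contains_eq_isSome_get? g k
          rw [hc] at this
          exact Option.isSome_iff_exists.mp this.symm
        have hmem : (k, vs) ∈ g.items := PySem.Dict.mem_items_of_get?_eq_some g hvs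
        have hvs_ne : vs ≠ [] := hne _ hmem
        have hgetDg : g.getD k [] = vs := PySem.Dict.getD_of_mem_items g hmem hnd []
        have hgetDA : (PySem.Dict.mk (g.items.map pvJoinVal)).getD k "" = PySem.Str.join ", " vs := by
          apply PySem.Dict.getD_of_mem_items
          · exact List.mem_map_of_mem hmem
          · simpa [PySem.Dict.keys_mk, List.map_map, pvJoinVal, Function.comp, PySem.Dict.keys] using hnd
        have hcA : (PySem.Dict.mk (g.items.map pvJoinVal)).contains k = true := by
          rw [contains_mapJoin]; exact hc
        rw [PySem.Dict.items_insert_of_contains _ _ hcA, hgetDA]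
        rw [PySem.Dict.modify, PySem.Dict.items_insert_of_contains _ _ hc, hgetDg]
        simp only [List.map_map]
        apply List.map_congr_left
        intro p hp
        by_cases hpk : p.1 == k
        · have hp1 : p.1 = k := by simpa using hpk
          have hpvs : p.2 = vs := by
            have := PySem.Dict.getD_of_mem_items g (k := p.1) (v := p.2) (by simpa using hp) hnd []
            rw [hp1] at this; rw [hgetDg] at this; exact this.symm
          simp only [Function.comp_apply, pvJoinVal, hpk, if_true, hpvs]
          rw [str_join_append_singleton vs _ hvs_ne]
        · simp [Function.comp, pvJoinVal, hpk]
      · -- fresh key: both append a new entry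
        rw [contains_mapJoin]
        simp only [hc, if_false, Bool.false_eq_true]
        have hcA : (PySem.Dict.mk (g.items.map pvJoinVal)).contains k = false := by
          rw [contains_mapJoin]; simpa using hc
        have hc' : g.contains k = false := by simpa using hc
        rw [PySem.Dict.items_insert_of_not_contains _ _ hcA]
        rw [PySem.Dict.modify, PySem.Dict.items_insert_of_not_contains _ _ hc']
        have : g.getD k [] = [] := PySem.Dict.getD_of_not_contains g [] hc'
        simp [this, pvJoinVal, PySem.Chars.join_singleton, PySem.Str.join]
    rw [hstepA]
    apply ih
    · -- keys stay Nodup through the modify step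
      simp only [pvStepB, htokeq]
      rw [PySem.Dict.modify]
      exact PySem.Dict.nodup_keys_insert _ _ _ hnd
    · -- values stay nonempty
      intro p hp
      simp only [pvStepB, htokeq, PySem.Dict.modify] at hp
      by_cases hc : g.contains k = true
      · rw [PySem.Dict.items_insert_of_contains _ _ hc] at hp
        obtain ⟨q, hq, hq2⟩ := List.mem_map.mp hp
        by_cases hqk : q.1 == k
        · simp only [hqk, if_true] at hq2
          subst hq2; simp
        · simp only [hqk, Bool.false_eq_true, if_false] at hq2
          subst hq2; exact hne _ hq
      · have hc' : g.contains k = false := by simpa using hc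
        rw [PySem.Dict.items_insert_of_not_contains _ _ hc'] at hp
        rcases List.mem_append.mp hp with h | h
        · exact hne _ h
        · simp only [List.mem_singleton] at h
          subst h; simp
    · intro l hl; exact hpre l (by simp [hl])

-- the piece-dict fold of A, rewritten as the canonical modify-append fold over (key, piece) pairs
lemma pvStepB_fold_eq (lines : List String)
    (hpre : ∀ l ∈ lines, pvTok l ≠ []) :
    lines.foldl pvStepB (PySem.Dict.mk [])
      = (lines.map (fun l => (pvKey l, pvPiece l))).foldl
          (fun d p => d.modify p.1 [] (fun v => v ++ [p.2])) (PySem.Dict.mk []) := by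
  rw [List.foldl_map]
  apply PySem.List.foldl_congr_mem
  intro d l hl
  obtain ⟨k, rest, he⟩ := List.exists_cons_of_ne_nil (hpre l hl)
  simp only [pvTok] at he
  simp only [pvStepB, pvKey, pvPiece, pvTok]
  rw [he]
  simp

-- ===== VERDICT (by name: the statement is the Claim_ definition above) =====
theorem edit_result_to_dict_spec : Claim_equal_edit_result_to_dict := by
  intro result _ hpre
  unfold Spec_edit_result_to_dict edit_result_to_dict edit_result_to_dict_alt
  set lines := ((PySem.Str.split? result "\n").getD []).filter is_not_empty with hlines
  have hpre' : ∀ l ∈ lines, pvTok l ≠ [] := fun l hl => hpre l hl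
  -- the common normal form: distinct keys in first-seen order, each paired with the join of its pieces
  set rhs := (PySem.Set.ofList (lines.map pvKey)).map
      (fun k => (k, PySem.Str.join ", " ((lines.filter (fun l => pvKey l == k)).map pvPiece)))
    with hrhs
  have hA : (lines.foldl pvStepA PySem.Dict.empty).items = rhs := by
    have h := pvInv lines PySem.Dict.empty
      (by simp [PySem.Dict.empty, PySem.Dict.keys]) (by simp [PySem.Dict.empty]) hpre
    simp only [PySem.Dict.empty, List.map_nil] at h ⊢
    rw [h, pvStepB_fold_eq lines hpre']
    have hnd := PySem.Dict.nodup_keys_foldl_modify_key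
      (lines.map (fun l => (pvKey l, pvPiece l))) (fun p => p.1) []
      (fun _ p => (fun v => v ++ [p.2])) (PySem.Dict.mk [])
      (by simp [PySem.Dict.keys])
    rw [PySem.Dict.items_eq_map_keys _ hnd []]
    rw [PySem.Dict.keys_foldl_modify_key
      (lines.map (fun l => (pvKey l, pvPiece l))) (fun p => p.1) []
      (fun _ p => (fun v => v ++ [p.2])) (PySem.Dict.mk [])]
    simp only [PySem.Dict.getD_foldl_modify_append, PySem.Dict.keys,
      List.map_map, List.filter_map, List.map_nil,
      PySem.Set.update_nil_left, hrhs]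
    simp [Function.comp_def, PySem.Dict.getD, PySem.Dict.get?]
    intro a _
    simp [pvJoinVal]
  have hB : ((lines.map pvTok).foldl (fun keys toks =>
        match toks with
        | [] => keys
        | k :: _ => if keys.contains k then keys else keys ++ [k]) ([] : List String)).map
      (fun key => (key, PySem.Str.join ", "
        (((lines.map pvTok).filter (fun toks => match toks with
            | [] => false
            | k :: _ => k == key)).map
          (fun toks => PySem.Str.join " " toks.tail)))) = rhs := by
    have hkeys : (lines.map pvTok).foldl (fun keys toks =>
          match toks with
          | [] => keys
          | k :: _ => if keys.contains k then keys else keys ++ [k]) ([] : List String)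
        = PySem.Set.ofList (lines.map pvKey) := by
      rw [List.foldl_map]
      have hc : lines.foldl (fun (x : List String) (y : String) =>
            match pvTok y with
            | [] => x
            | k :: _ => if x.contains k then x else x ++ [k]) []
          = lines.foldl (fun (s : List String) (l : String) => PySem.Set.add s (pvKey l)) [] := by
        apply PySem.List.foldl_congr_mem
        intro acc l hl
        obtain ⟨k, rest, he⟩ := List.exists_cons_of_ne_nil (hpre' l hl)
        simp only [pvKey, he, List.headD_cons, PySem.Set.add]
        simp [PySem.Set.contains]
      rw [hc, ← PySem.Set.update_map_eq_foldl_add, PySem.Set.update_nil_left]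
    rw [hkeys, hrhs]
    apply List.map_congr_left
    intro k _
    have hfil : (lines.map pvTok).filter (fun toks => match toks with
          | [] => false
          | k' :: _ => k' == k)
        = (lines.map pvTok).filter (fun toks => toks.headD "" == k) := by
      apply List.filter_congr
      intro toks htoks
      obtain ⟨l, hl, rfl⟩ := List.mem_map.mp htoks
      obtain ⟨k', rest, he⟩ := List.exists_cons_of_ne_nil (hpre' l hl)
      rw [he]
      simp
    rw [hfil, List.filter_map, List.map_map]
    have h1 : ((fun (toks : List String) => toks.headD "" == k) ∘ pvTok)
        = fun l => pvKey l == k := by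
      funext l; simp [Function.comp, pvKey]
    have h2 : ((fun (toks : List String) => PySem.Str.join " " toks.tail) ∘ pvTok) = pvPiece := by
      funext l; simp [Function.comp, pvPiece]
    rw [h1, h2]
  -- both ports compute the normal form
  calc (lines.foldl (fun dictionary line =>
          let filtered_line := ((PySem.Str.split? line " ").getD []).filter is_not_empty
          match filtered_line with
          | [] => dictionary
          | k :: rest =>
            if dictionary.contains k then
              dictionary.insert k (dictionary.getD k "" ++ (", " ++ PySem.Str.join " " rest))
            else
              dictionary.insert k (PySem.Str.join " " rest)) PySem.Dict.empty).items
      = (lines.foldl pvStepA PySem.Dict.empty).items := rfl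
    _ = rhs := hA
    _ = ((lines.map pvTok).foldl (fun keys toks =>
            match toks with
            | [] => keys
            | k :: _ => if keys.contains k then keys else keys ++ [k]) ([] : List String)).map
          (fun key => (key, PySem.Str.join ", "
            (((lines.map pvTok).filter (fun toks => match toks with
                | [] => false
                | k :: _ => k == key)).map
              (fun toks => PySem.Str.join " " toks.tail)))) := hB.symm
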